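-- pv_equiv track=rewrite | github.com/Hanna0036/230066-Kripto25 | Hill-Cipher/hillcipher.py | convert
-- ===== SOURCE A (Python) =====
-- huruf = [
--  'a', 'b', 'c', 'd', 'e', 'f',
--  'g', 'h', 'i', 'j', 'k', 'l',
--  'm', 'n', 'o', 'p', 'q', 'r',
--  's', 't', 'u', 'v', 'w', 'x',
--  'y', 'z'
-- ]
--
-- def convert(inputHuruf):
--     convertHuruf = []
--     for x in range(len(inputHuruf)):
--         for y in range(len(huruf)) :
--             if huruf[y] == inputHuruf[x].lower() :
--                 convertHuruf.append(y)
--                 break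
--     return convertHuruf
-- ===== SOURCE B (Python) =====
-- def convert(inputHuruf):
--     return [i for i in (ord(c.lower()) - ord('a') for c in inputHuruf) if 0 <= i < 26]
-- ===== Notes on version B (the rewrite author's own statement) =====
-- stated objective: faster
-- what changed: Replaces the per-character linear scan of the 26-letter list (with break) by a closed-form arithmetic alphabet index (character code minus the code of the first lowercase letter) with a range guard, built as a single comprehension.
import Mathlib
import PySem

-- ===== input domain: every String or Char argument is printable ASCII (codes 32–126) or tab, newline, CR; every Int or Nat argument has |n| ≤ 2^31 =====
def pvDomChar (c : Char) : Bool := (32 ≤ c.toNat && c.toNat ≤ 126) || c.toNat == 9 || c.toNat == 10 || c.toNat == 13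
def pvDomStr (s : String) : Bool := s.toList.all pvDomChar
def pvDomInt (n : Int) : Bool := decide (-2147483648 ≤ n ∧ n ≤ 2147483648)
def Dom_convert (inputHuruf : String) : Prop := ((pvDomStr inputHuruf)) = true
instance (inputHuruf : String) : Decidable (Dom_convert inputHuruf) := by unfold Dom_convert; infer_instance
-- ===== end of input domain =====

-- B replaces A's per-character scan of the 26-letter list by a closed-form
-- arithmetic index with a range guard (a single comprehension).


-- ===== PORT A =====
-- the module-level list `huruf`
def hurufA : List Char :=
  ['a','b','c','d','e','f','g','h','i','j','k','l','m',
   'n','o','p','q','r','s','t','u','v','w','x','y','z']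

-- inner `for y in range(len(huruf))` loop with its break: appends the first
-- matching index to the accumulator, or leaves it unchanged
def innerScanA (c : Char) (ys : List Int) (acc : List Int) : List Int :=
  match ys with
  | [] => acc
  | y :: rest =>
      if PySem.List.pyGetD hurufA y ' ' == c then acc ++ [y]
      else innerScanA c rest acc

def convert (inputHuruf : String) : List Int :=
  (PySem.List.pyRange 0 (PySem.Str.len inputHuruf) 1).foldl
    (fun acc x =>
      innerScanA (PySem.Chars.lowerChar (PySem.List.pyGetD inputHuruf.toList x ' '))
        (PySem.List.pyRange 0 (PySem.List.len hurufA) 1) acc)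
    []

-- ===== PORT B =====
def convert_alt (inputHuruf : String) : List Int :=
  inputHuruf.toList.filterMap (fun c =>
    let i : Int := ((PySem.Chars.lowerChar c).toNat : Int) - 97
    if 0 ≤ i ∧ i < 26 then some i else none)

-- ===== PRECONDITION & SPEC =====
def Spec_convert (inputHuruf : String) (out : List Int) : Prop := out = convert_alt inputHuruf
instance (inputHuruf : String) (out : List Int) : Decidable (Spec_convert inputHuruf out) := by unfold Spec_convert; infer_instance

-- ===== CLAIM (what is proved, stated in full; the proofs are below) =====
def Claim_equal_convert : Prop := ∀ (inputHuruf : String), Dom_convert inputHuruf → Spec_convert inputHuruf (convert inputHuruf)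

-- ===== LEMMAS AND PROOFS =====

-- A's inner scan leaves the accumulator unchanged when no letter matches
theorem innerScanA_no_match (c : Char) (ys : List Int) (acc : List Int)
    (h : ∀ y ∈ ys, (PySem.List.pyGetD hurufA y ' ' == c) = false) :
    innerScanA c ys acc = acc := by
  induction ys with
  | nil => rfl
  | cons y rest ih =>
      rw [innerScanA, h y (by simp)]
      exact ih (fun z hz => h z (by simp [hz]))

-- the accumulator is only appended to
theorem innerScanA_append (c : Char) (ys : List Int) (acc : List Int) :
    innerScanA c ys acc = acc ++ innerScanA c ys [] := by
  induction ys generalizing acc with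
  | nil => simp [innerScanA]
  | cons y rest ih =>
      rw [innerScanA, innerScanA]
      by_cases h : (PySem.List.pyGetD hurufA y ' ' == c) = true
      · simp [h]
      · rw [if_neg h, if_neg h, ih, ih ([] : List Int)]

-- per-character: A's 26-element scan appends exactly B's optional index
set_option maxRecDepth 8192 in
theorem innerScanA_eq (c : Char) (acc : List Int) :
    innerScanA c (PySem.List.pyRange 0 26 1) acc =
      acc ++ ((if 0 ≤ ((c.toNat : Int) - 97) ∧ ((c.toNat : Int) - 97) < 26
               then some ((c.toNat : Int) - 97) else none).toList) := by
  rw [innerScanA_append]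
  refine congrArg (acc ++ ·) ?_
  by_cases h : 97 ≤ c.toNat ∧ c.toNat ≤ 122
  · obtain ⟨h1, h2⟩ := h
    interval_cases hn : c.toNat <;>
      (rw [← Char.ofNat_toNat c, hn]; decide)
  · rw [if_neg (by omega), Option.toList_none]
    apply innerScanA_no_match
    intro y hy
    have hy' := (PySem.List.mem_pyRange_one.mp hy)
    have hmem : PySem.List.pyGetD hurufA y ' ' ∈ hurufA :=
      PySem.List.pyGetD_mem hurufA ' ' (by
        rw [show hurufA.length = 26 from rfl]
        exact ⟨by omega, by omega⟩)
    have hall : ∀ d ∈ hurufA, 97 ≤ d.toNat ∧ d.toNat ≤ 122 := by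
      intro d hd; fin_cases hd <;> exact ⟨by decide, by decide⟩
    have := hall _ hmem
    rw [beq_eq_false_iff_ne]
    intro e
    rw [e] at this
    omega

-- the outer loop builds acc ++ B's filterMap
theorem convert_foldl_eq (l : List Char) (acc : List Int) :
    l.foldl (fun acc c =>
        innerScanA (PySem.Chars.lowerChar c) (PySem.List.pyRange 0 26 1) acc) acc =
      acc ++ l.filterMap (fun c =>
        let i : Int := ((PySem.Chars.lowerChar c).toNat : Int) - 97
        if 0 ≤ i ∧ i < 26 then some i else none) := by
  induction l generalizing acc with
  | nil => simp
  | cons c rest ih =>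
      rw [List.foldl_cons, innerScanA_eq, ih, List.filterMap_cons]
      by_cases hg : 0 ≤ ((PySem.Chars.lowerChar c).toNat : Int) - 97 ∧
          ((PySem.Chars.lowerChar c).toNat : Int) - 97 < 26
      · simp only [hg]
        simp [List.append_assoc]
      · simp only [hg]
        simp

-- ===== VERDICT (by name: the statement is the Claim_ definition above) =====
theorem convert_spec : Claim_equal_convert := by
  intro s _
  unfold Spec_convert convert convert_alt
  rw [show PySem.List.len hurufA = 26 from rfl,
      show PySem.Str.len s = PySem.List.len s.toList from by
        simp [PySem.Str.len_eq, PySem.List.len_eq]]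
  have h := PySem.List.foldl_pyRange_pyGetD s.toList ' '
      (fun acc c => innerScanA (PySem.Chars.lowerChar c) (PySem.List.pyRange 0 26 1) acc)
      [] (a := 0) (le_refl 0)
  simp only [Int.toNat_zero, List.drop_zero] at h
  exact h.trans ((convert_foldl_eq s.toList []).trans (List.nil_append _))
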